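-- pv_equiv track=rewrite | github.com/svkampen/James | plugins/util/box.py | twocol
-- ===== SOURCE A (Python) =====
-- import math
--
-- box = {'lbot': '└', 'vert': '│', 'rbot': '┘', 'ltop': '┌', 'tsplit': '┬',
--        'horz': '─', 'rtsplit': '┴', 'rtop': '┐'}
--
-- def divide(items, size):
--     return [items[x:x+size] for x in range(0, len(items), size)]
--
-- def getitem(items, index):
--     try:
--         return items[index]
--     except (KeyError, IndexError):
--         return ""
--
-- def twocol(items):
--     max_len = max(len(i) for i in items) + 2
--     rows = math.ceil(len(items) / 2)
--     dl = divide(items, rows)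
--     out = out = box["ltop"] + max_len * box["horz"] + box["tsplit"] + max_len * box["horz"] + box["rtop"]
--     for i in range(0, rows):
--         out += "\n" + box["vert"] + getitem(dl[0], i).center(max_len) + box["vert"] + getitem(dl[1], i).center(max_len) + box["vert"]
--     out += "\n" + box["lbot"] + max_len * box["horz"] + box["rtsplit"] + max_len * box['horz'] + box['rbot']
--     return out
-- ===== SOURCE B (Python) =====
-- box = {'lbot': '└', 'vert': '│', 'rbot': '┘', 'ltop': '┌', 'tsplit': '┬',
--        'horz': '─', 'rtop': '┐', 'rtsplit': '┴'}
--
-- def twocol(items):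
--     max_len = max(len(i) for i in items) + 2
--     rows = (len(items) + 1) // 2
--     # scatter pass: item idx lands on body line idx % rows (column idx // rows)
--     body = [""] * rows
--     for idx, it in enumerate(items):
--         body[idx % rows] += box['vert'] + it.center(max_len)
--     if len(items) % 2:
--         body[rows - 1] += box['vert'] + max_len * ' '
--     horz = max_len * box['horz']
--     top = box['ltop'] + horz + box['tsplit'] + horz + box['rtop']
--     bot = box['lbot'] + horz + box['rtsplit'] + horz + box['rbot']
--     return '\n'.join([top] + [line + box['vert'] for line in body] + [bot])
-- ===== Notes on version B (the rewrite author's own statement) =====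
-- stated objective: alternative
-- what changed: Instead of splitting the list at the ceiling midpoint and indexing both halves per row (with a try/except getitem helper), B makes a single scatter pass over the whole list placing item idx onto body line idx % rows, pads the last line once when the count is odd, and joins staged top/body/bottom lines.
-- outside the precondition, e.g. on twocol([]): A raises ValueError, B raises ValueError; on twocol(['a']): A raises IndexError, B returns '┌───┬───┐\n│ a │   │\n└───┴───┘'
-- crash fix: On a single-item list A raises IndexError (dl[1] does not exist) while B returns the one-row box with an empty right column. — e.g. on twocol(["a"]): A raises IndexError, B returns "┌───┬───┐\n│ a │ │\n└───┴───┘"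
import Mathlib
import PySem

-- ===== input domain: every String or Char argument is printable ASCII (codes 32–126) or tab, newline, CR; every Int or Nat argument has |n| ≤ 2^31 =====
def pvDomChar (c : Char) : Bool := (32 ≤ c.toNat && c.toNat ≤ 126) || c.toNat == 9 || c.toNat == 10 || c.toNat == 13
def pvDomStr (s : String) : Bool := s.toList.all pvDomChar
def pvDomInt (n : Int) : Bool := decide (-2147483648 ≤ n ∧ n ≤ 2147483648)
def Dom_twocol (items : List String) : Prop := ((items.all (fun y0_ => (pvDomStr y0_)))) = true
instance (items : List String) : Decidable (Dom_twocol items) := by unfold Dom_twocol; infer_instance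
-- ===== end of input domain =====

-- B replaces A's split-at-midpoint plus per-row indexing of both halves (with a try/except `getitem`
-- helper) by a single scatter pass that places item idx onto body line idx % rows, a one-off pad of
-- the last line when the count is odd, and a join of staged top/body/bottom lines; no speed claim.

-- ===== PORT A =====
-- str.center(width) ported by hand (CPython do_center): exact — left pad = marg//2 + (marg & width & 1).
def pyCenter (s : List Char) (w : Int) : List Char :=
  let marg : Int := w - s.length
  if marg ≤ 0 then s
  else
    let left : Int := PySem.Int.floordiv marg 2 + (Int.land (Int.land marg w) 1)
    List.replicate left.toNat ' ' ++ s ++ List.replicate (marg - left).toNat ' '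

def pvDivide (items : List String) (size : Int) : List (List String) :=
  (PySem.List.pyRange 0 (items.length : Int) size).map
    (fun x => PySem.List.slice items (some x) (some (x + size)))

-- getitem: items[index] with try/except (KeyError, IndexError) returning "" — exactly pyGetD.
def pvGetitem (xs : List String) (i : Int) : String := PySem.List.pyGetD xs i ""

def twocol (items : List String) : String :=
  let maxLen : Int := (PySem.List.max? (items.map PySem.Str.len) (fun x => x)).getD 0 + 2
  -- math.ceil(len(items)/2) ported as (n+1)//2: exact for the nonnegative ints in Dom (no float rounding there)
  let rows : Int := PySem.Int.floordiv ((items.length : Int) + 1) 2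
  let dl := pvDivide items rows
  -- dl[0] / dl[1] raise IndexError when missing (the one-item case); Pre_ excludes that, default [] is never read inside Pre_
  let horz := PySem.List.pyRepeat ['─'] maxLen
  let out0 : List Char := '┌' :: (horz ++ '┬' :: (horz ++ ['┐']))
  let out1 := (PySem.List.pyRange 0 rows 1).foldl (fun out i =>
      out ++ '\n' :: '│' :: (pyCenter (pvGetitem (PySem.List.pyGetD dl 0 []) i).toList maxLen
        ++ '│' :: (pyCenter (pvGetitem (PySem.List.pyGetD dl 1 []) i).toList maxLen ++ ['│']))) out0
  String.ofList (out1 ++ '\n' :: '└' :: (horz ++ '┴' :: (horz ++ ['┘'])))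

-- ===== PORT B =====
def twocol_alt (items : List String) : String :=
  let maxLen : Int := (PySem.List.max? (items.map PySem.Str.len) (fun x => x)).getD 0 + 2
  let rows : Int := PySem.Int.floordiv ((items.length : Int) + 1) 2
  -- scatter pass: body[idx % rows] += '│' + it.center(max_len)
  let body0 : List (List Char) := List.replicate rows.toNat []
  let body1 := (PySem.List.enumerate items).foldl (fun b p =>
      PySem.List.pySetD b (PySem.Int.mod p.1 rows)
        (PySem.List.pyGetD b (PySem.Int.mod p.1 rows) [] ++ '│' :: pyCenter p.2.toList maxLen)) body0
  let body2 := if PySem.Int.mod (items.length : Int) 2 ≠ 0 then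
      PySem.List.pySetD body1 (rows - 1)
        (PySem.List.pyGetD body1 (rows - 1) [] ++ '│' :: PySem.List.pyRepeat [' '] maxLen)
    else body1
  let horz := PySem.List.pyRepeat ['─'] maxLen
  let top : List Char := '┌' :: (horz ++ '┬' :: (horz ++ ['┐']))
  let bot : List Char := '└' :: (horz ++ '┴' :: (horz ++ ['┘']))
  String.ofList (PySem.Chars.join ['\n'] (top :: (body2.map (fun l => l ++ ['│']) ++ [bot])))

-- ===== PRECONDITION & SPEC =====
-- A raises on fewer than two items (ValueError from max() on [], IndexError from dl[1] on a singleton), so Pre_ excludes those.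
def Pre_twocol (items : List String) : Prop := 2 ≤ items.length
instance (items : List String) : Decidable (Pre_twocol items) := by unfold Pre_twocol; infer_instance
def pvWitness_twocol : List String := (["a", "bb"])

-- On a single-item list A raises IndexError (dl[1] does not exist) while B returns the one-row box with an empty right column.
def Raises_twocol (items : List String) : Prop := items.length = 1
instance (items : List String) : Decidable (Raises_twocol items) := by unfold Raises_twocol; infer_instance
def pvRaiseWitness_twocol : List String := (["a"])
def pvRaiseWitnessOut_twocol : String := "┌───┬───┐\n│ a │   │\n└───┴───┘"

def Spec_twocol (items : List String) (out : String) : Prop := out = twocol_alt items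
instance (items : List String) (out : String) : Decidable (Spec_twocol items out) := by unfold Spec_twocol; infer_instance

-- ===== CLAIM (what is proved, stated in full; the proofs are below) =====
def Claim_equal_twocol : Prop := ∀ (items : List String), Dom_twocol items → Pre_twocol items → Spec_twocol items (twocol items)
def Claim_raises_twocol : Prop := (∀ (items : List String), Dom_twocol items → Raises_twocol items → ¬ Pre_twocol items) ∧ (Dom_twocol (pvRaiseWitness_twocol) ∧ Raises_twocol (pvRaiseWitness_twocol) ∧ twocol_alt (pvRaiseWitness_twocol) = pvRaiseWitnessOut_twocol)

-- ===== LEMMAS AND PROOFS =====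

-- '\n'.join on a nonempty list of lines
lemma joinNl_cons (x : List Char) (xs : List (List Char)) :
    PySem.Chars.join ['\n'] (x :: xs) = x ++ xs.flatMap (fun l => '\n' :: l) := by
  induction xs generalizing x with
  | nil => simp [PySem.Chars.join_singleton]
  | cons y ys ih =>
      rw [PySem.Chars.join_cons_cons, ih y]
      simp

-- the scatter phase: folding "append g i at slot (s+i) % r" over consecutive indices whose slots
-- are exactly 0,1,…,k-1 acts as a pointwise mapIdx
lemma scatter_phase (g : Nat → List Char) (r : Nat) :
    ∀ (k : Nat) (s : Nat) (b : List (List Char)), b.length = r → k ≤ r →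
      (∀ i, i < k → (s + i) % r = i) →
      (List.range' s k).foldl (fun b i => b.set (i % r) (b.getD (i % r) [] ++ g i)) b
        = b.mapIdx (fun j x => if j < k then x ++ g (s + j) else x) := by
  intro k
  induction k with
  | zero =>
      intro s b hb _ _
      apply List.ext_getElem (by simp)
      intro j h1 h2
      simp
  | succ k ih =>
      intro s b hb hk hmod
      rw [List.range'_1_concat, List.foldl_append]
      rw [ih s b hb (by omega) (fun i hi => hmod i (by omega))]
      have hsk : (s + k) % r = k := hmod k (by omega)
      set prev := b.mapIdx (fun j x => if j < k then x ++ g (s + j) else x) with hprev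
      have hplen : prev.length = r := by simp [hprev, hb]
      have hkr : k < r := by omega
      have hgetk : prev.getD ((s + k) % r) [] = b[k]'(by omega) := by
        rw [hsk]
        rw [List.getD_eq_getElem _ _ (by omega)]
        simp [hprev, List.getElem_mapIdx]
      simp only [List.foldl_cons, List.foldl_nil, hsk]
      apply List.ext_getElem (by simp [hplen, hb])
      intro j h1 h2
      rw [List.getElem_set]
      by_cases hj : k = j
      · subst hj
        have hkb : k < b.length := by omega
        simp [hprev, List.getElem_mapIdx, List.getElem?_eq_getElem hkb]
      · have hj2 : j < r := by simp [hplen] at h1; omega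
        simp only [if_neg hj, hprev, List.getElem_mapIdx]
        have : j < k ↔ j < k + 1 := by omega
        split_ifs with h3 h4 <;> first | rfl | omega

-- pyCenter of the empty string is max_len * ' '
lemma pyCenter_nil (m : Nat) : pyCenter [] ((m : Nat) : Int) = List.replicate m ' ' := by
  unfold pyCenter
  by_cases hm : m = 0
  · subst hm; simp
  · have h1 : ¬ ((m : Int) - ([] : List Char).length ≤ 0) := by simp; omega
    rw [if_neg h1]
    simp only [List.length_nil, Int.natCast_zero, sub_zero, List.append_nil]
    have hland : Int.land (Int.land (m : Int) (m : Int)) 1 = ((m % 2 : Nat) : Int) := by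
      have hmm : Int.land (m : Int) (m : Int) = (m : Int) := by
        have : Int.land (m:Int) (m:Int) = ((m &&& m : Nat) : Int) := by exact_mod_cast rfl
        simpa [Nat.and_self] using this
      rw [hmm]
      have : Int.land (m:Int) ((1:Nat):Int) = ((m &&& 1 : Nat) : Int) := by exact_mod_cast rfl
      simpa [Nat.and_one_is_mod] using this
    have hfd : PySem.Int.floordiv (m : Int) 2 = ((m / 2 : Nat) : Int) := by
      exact_mod_cast PySem.Int.floordiv_natCast m 2
    rw [hland, hfd]
    have e1 : (((m / 2 : Nat) : Int) + ((m % 2 : Nat) : Int)).toNat = m / 2 + m % 2 := by omega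
    have e2 : ((m : Int) - (((m / 2 : Nat) : Int) + ((m % 2 : Nat) : Int))).toNat = m - (m / 2 + m % 2) := by omega
    rw [e1, e2, ← List.replicate_add]
    congr 1
    omega

theorem twocol_main (items : List String) (h : 2 ≤ items.length) :
    twocol items = twocol_alt items := by
  have h1 : 1 ≤ (items.length + 1)/2 := by omega
  have h2 : (items.length + 1)/2 < items.length := by omega
  have h3 : items.length ≤ 2*((items.length + 1)/2) := by omega
  set n := items.length with hn
  set r := (n + 1)/2 with hrdef
  unfold twocol twocol_alt pvDivide pvGetitem
  have hrows : PySem.Int.floordiv ((items.length : Int) + 1) 2 = (r : Int) := by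
    have e : ((items.length : Int) + 1) = ((items.length + 1 : Nat) : Int) := by push_cast; ring
    rw [e, ← hn, hrdef]
    have := PySem.Int.floordiv_natCast (n + 1) 2
    exact_mod_cast this
  rw [hrows]
  set maxLen : Int := (PySem.List.max? (items.map PySem.Str.len) (fun x => x)).getD 0 + 2 with hml
  -- A side: dl = [items[:r], items[r:]]
  have hcount : (((items.length : Int) - 0 + (r : Int) - 1) / (r : Int)).toNat = 2 := by
    have hnum : ((items.length : Int) - 0 + (r : Int) - 1) = ((n + r - 1 : Nat) : Int) := by
      rw [← hn]; omega
    rw [hnum, ← Int.natCast_ediv, Int.toNat_natCast]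
    have lo : 2 * r ≤ n + r - 1 := by omega
    have hi : n + r - 1 < Nat.succ 2 * r := by omega
    exact Nat.div_eq_of_lt_le lo hi
  have hdl : PySem.List.pyRange 0 (items.length : Int) (r : Int) = [0, (r : Int)] := by
    rw [PySem.List.pyRange_of_pos 0 (items.length : Int) (by exact_mod_cast h1)]
    rw [if_pos (by exact_mod_cast (by omega : 0 < n))]
    rw [hcount]
    simp [List.range_succ]
  dsimp only
  rw [hdl]
  have hsl1 : PySem.List.slice items (some 0) (some (0 + (r : Int))) = items.take r := by
    have h0 : (0:Int) + (r:Int) = ((r:Nat):Int) := by ring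
    rw [h0, PySem.List.slice_zero_start, PySem.List.slice_to_natCast]
  have hsl2 : PySem.List.slice items (some (r : Int)) (some ((r : Int) + (r : Int))) = items.drop r := by
    have := PySem.List.slice_natCast_add (xs := items) (j := r) (n := r)
    rw [this]
    exact List.take_of_length_le (by simp [← hn]; omega)
  rw [List.map_cons, List.map_cons, List.map_nil, hsl1, hsl2]
  simp only [PySem.List.pyGetD_ofNat', List.getD_cons_zero, List.getD_cons_succ]
  rw [PySem.List.foldl_append_eq_flatMap, PySem.List.pyRange_one]
  -- B side: reduce the enumerate fold to a Nat-indexed scatter fold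
  -- maxLen is a cast natural number
  have hne : items.map PySem.Str.len ≠ [] := by
    intro hc
    rw [List.map_eq_nil_iff] at hc
    have h0 : n = 0 := by rw [hn, hc]; rfl
    omega
  obtain ⟨v, hv⟩ : ∃ v, PySem.List.max? (items.map PySem.Str.len) (fun x => x) = some v := by
    cases hlx : items.map PySem.Str.len with
    | nil => exact absurd hlx hne
    | cons x t => exact ⟨t.foldl max x, PySem.List.max?_id_cons x t⟩
  have hv0 : 0 ≤ v := by
    have hmem := PySem.List.max?_mem hv
    obtain ⟨s, _, hs⟩ := List.mem_map.mp hmem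
    rw [← hs, PySem.Str.len_eq]
    positivity
  obtain ⟨m, hm⟩ : ∃ m : Nat, maxLen = (m : Int) := ⟨(v + 2).toNat, by rw [hml, hv]; simp; omega⟩
  -- the scatter fold over enumerate = a Nat-indexed fold over range n
  have hfold :
      (PySem.List.enumerate items).foldl (fun b p =>
        PySem.List.pySetD b (PySem.Int.mod p.1 (r : Int))
          (PySem.List.pyGetD b (PySem.Int.mod p.1 (r : Int)) [] ++ '│' :: pyCenter p.2.toList maxLen))
        (List.replicate ((r : Int)).toNat []) =
      (List.range n).foldl (fun b k => b.set (k % r)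
          (b.getD (k % r) [] ++ '│' :: pyCenter (items.getD k "").toList maxLen))
        (List.replicate r []) := by
    rw [PySem.List.enumerate_eq_map_pyRange (d := ""), List.foldl_map, PySem.List.pyRange_one,
      List.foldl_map]
    simp only [PySem.List.len_eq, sub_zero, Int.toNat_natCast, zero_add, ← hn]
    apply List.foldl_ext
    intro b k _
    rw [PySem.Int.mod_natCast, PySem.List.pySetD_natCast, PySem.List.pyGetD_natCast,
      PySem.List.pyGetD_natCast]
  set cL : Nat → List Char := fun k => '│' :: pyCenter (items.getD k "").toList maxLen with hcL
  have hb1 := scatter_phase cL r r 0 (List.replicate r []) (by simp) (le_refl r)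
    (fun i hi => by simpa using Nat.mod_eq_of_lt hi)
  set b1 := (List.replicate r ([] : List Char)).mapIdx (fun j x => if j < r then x ++ cL (0 + j) else x)
    with hb1d
  have hb1len : b1.length = r := by simp [hb1d]
  have hb2 := scatter_phase cL r (n - r) r b1 hb1len (by omega)
    (fun i hi => by
      rw [Nat.add_mod_left]
      exact Nat.mod_eq_of_lt (by omega))
  set b2 := b1.mapIdx (fun j x => if j < n - r then x ++ cL (r + j) else x) with hb2d
  have hb2len : b2.length = r := by simp [hb2d, hb1len]
  have hsplitfold : (List.range n).foldl
        (fun b k => b.set (k % r) (b.getD (k % r) [] ++ cL k)) (List.replicate r []) = b2 := by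
    rw [show n = r + (n - r) by omega, List.range_add, List.foldl_append,
      List.range_eq_range', ← List.range'_eq_map_range, hb1, hb2]
  -- elementwise values of b2
  have hb2get : ∀ j (hj : j < r), b2[j]'(by omega) =
      cL j ++ (if j < n - r then cL (r + j) else []) := by
    intro j hj
    simp only [hb2d, hb1d, List.getElem_mapIdx, List.getElem_replicate]
    rw [if_pos hj]
    split_ifs <;> simp
  -- the final body = row-by-row map over range r
  have hchar : (if PySem.Int.mod ((items.length : Nat) : Int) 2 ≠ 0 then
        PySem.List.pySetD b2 ((r : Int) - 1)
          (PySem.List.pyGetD b2 ((r : Int) - 1) [] ++ '│' :: PySem.List.pyRepeat [' '] maxLen)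
      else b2) =
      (List.range r).map (fun j =>
        '│' :: pyCenter ((items.take r).getD j "").toList maxLen ++
        '│' :: pyCenter ((items.drop r).getD j "").toList maxLen) := by
    have htake : ∀ j, j < r → (items.take r).getD j "" = items.getD j "" := by
      intro j hj
      simp [List.getD, hj]
    have hdrop : ∀ j, (items.drop r).getD j "" = items.getD (r + j) "" := by
      intro j
      simp [List.getD, List.getElem?_drop]
    have hmod2 : PySem.Int.mod ((items.length : Nat) : Int) 2 = ((n % 2 : Nat) : Int) := by
      rw [← hn]; exact PySem.Int.mod_natCast n 2
    by_cases hpar : n % 2 = 0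
    · -- even: n - r = r, no padding
      have hnr : n - r = r := by omega
      rw [hmod2, hpar, if_neg (by simp)]
      apply List.ext_getElem (by simp [hb2len])
      intro j h1 h2
      rw [hb2get j (by omega)]
      have hj : j < r := by simpa [hb2len] using h1
      simp only [List.getElem_map, List.getElem_range]
      rw [htake j hj, hdrop j, if_pos (by omega)]
    · -- odd: n - r = r - 1, the last line is padded with an empty right cell
      have hnr : n - r = r - 1 := by omega
      have hpad : pyCenter ("" : String).toList maxLen = PySem.List.pyRepeat [' '] maxLen := by
        have : ("" : String).toList = ([] : List Char) := rfl
        rw [this, hm, pyCenter_nil, PySem.List.pyRepeat_singleton, Int.toNat_natCast]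
      rw [hmod2, if_pos (by simp; omega)]
      have hr1 : (r : Int) - 1 = ((r - 1 : Nat) : Int) := by omega
      rw [hr1, PySem.List.pySetD_natCast, PySem.List.pyGetD_natCast]
      apply List.ext_getElem (by simp [hb2len])
      intro j h1 h2
      have hj : j < r := by simpa [hb2len] using h1
      rw [List.getElem_set]
      simp only [List.getElem_map, List.getElem_range]
      by_cases hje : r - 1 = j
      · rw [if_pos hje]
        have hgd : b2.getD (r - 1) [] = cL (r - 1) := by
          rw [List.getD_eq_getElem _ _ (by omega), hb2get (r - 1) (by omega), if_neg (by omega)]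
          simp
        rw [hgd, ← hje, htake (r - 1) (by omega)]
        have hdr : (items.drop r).getD (r - 1) "" = "" := by
          apply List.getD_eq_default
          simp [← hn]; omega
        rw [hdr, hpad, hcL]
      · rw [if_neg hje]
        rw [hb2get j (by omega), if_pos (by omega)]
        rw [htake j hj, hdrop j, hcL]
  rw [hfold, hsplitfold, hchar, joinNl_cons]
  simp only [List.flatMap_append, List.flatMap_map, List.flatMap_cons, List.flatMap_nil,
    List.append_nil, sub_zero, Int.toNat_natCast, zero_add, PySem.List.pyGetD_natCast,
    List.append_assoc, List.cons_append, List.nil_append]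

-- ===== VERDICT (by name: the statement is the Claim_ definition above) =====
theorem twocol_spec : Claim_equal_twocol := by
  intro items _ hpre
  unfold Spec_twocol
  exact twocol_main items hpre

@[simp] theorem twocol_raises : Claim_raises_twocol := by
  unfold Claim_raises_twocol
  constructor
  · intro items _ hr
    unfold Raises_twocol at hr
    unfold Pre_twocol
    omega
  · refine ⟨by decide, by decide, by decide⟩
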